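-- pv_equiv track=rewrite | github.com/jodivaso/ImageZigZag | BinaryImageZigzagHomology.py | simplicesListToZigzagFiltration
-- ===== SOURCE A (Python) =====
-- def simplicesListToZigzagFiltration(slist, n):
--     total_simplices_l = []
--     total_simplices_set = set()
--     indices_l = []
--     previous_simplices_l = []
--     previous_simplices_set = set()
--     slistaux = []
--     aux = []
--
--     for sc in slist:
--         if n == 0:
--             aux = sorted(sc, key=lambda x: (x[0]))
--         elif n == 1:
--             aux = sorted(sc, key=lambda x: (x[0], x[1]))
--         elif n == 2:
--             aux = sorted(sc, key=lambda x: (x[0], x[1], x[2]))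
--         elif n == 3:
--             aux = sorted(sc, key=lambda x: (x[0], x[1], x[2], x[3]))
--
--         for i in range(len(aux)):
--             aux[i] = list(aux[i])
--         slistaux.append(aux)
--
--     for i, sc in enumerate(slist):
--         for s in slistaux[i]:
--             if (tuple(s) in total_simplices_set):
--                 if not (tuple(s) in previous_simplices_set):
--                     index = total_simplices_l.index(s)
--                     indices_l[index].append(i)
--             else:
--                 total_simplices_l.append(s)
--                 total_simplices_set.add(tuple(s))
--                 indices_l.append([i])
--         for s in previous_simplices_l:
--             if not (tuple(s) in sc):
--                 index = total_simplices_l.index(s)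
--                 indices_l[index].append(i)
--         previous_simplices_set = sc
--         previous_simplices_l = slistaux[i]
--
--     return total_simplices_l, indices_l
-- ===== SOURCE B (Python) =====
-- def simplicesListToZigzagFiltration(slist, n):
--     # Simplex-major reformulation: record first-appearance order and per-complex
--     # occurrence counts once, then emit each simplex's index list in closed form
--     # from the enter/leave rule (index i appears when the simplex enters at i or
--     # left after i-1).
--     if not (0 <= n <= 3):
--         return [], []
--     slistaux = [[list(s) for s in sorted(sc, key=lambda x: tuple(x[:n + 1]))]
--                 for sc in slist]
--     total, seen, counts = [], set(), []
--     for aux in slistaux: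
--         c = {}
--         for s in aux:
--             t = tuple(s)
--             if t not in seen:
--                 seen.add(t)
--                 total.append(s)
--             c[t] = c.get(t, 0) + 1
--         counts.append(c)
--     indices = []
--     for s in total:
--         t = tuple(s)
--         lst, prev = [], 0
--         for i, c in enumerate(counts):
--             cur = c.get(t, 0)
--             lst.extend([i] * ((cur if prev == 0 else 0) + (prev if cur == 0 else 0)))
--             prev = cur
--         indices.append(lst)
--     return total, indices
-- ===== Notes on version B (the rewrite author's own statement) =====
-- stated objective: alternative
-- what changed: A builds the index lists time-major, repeatedly re-searching total_simplices_l with list.index inside both inner loops; B first records the first-appearance order and per-complex occurrence counters in one pass, then emits each simplex's index list simplex-major in closed form from the counters (index i appears count_i + count_{i-1} times), with an explicit guard returning empty results for dimensions outside 0..3 where A's sort key chain never fires.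
import Mathlib
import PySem

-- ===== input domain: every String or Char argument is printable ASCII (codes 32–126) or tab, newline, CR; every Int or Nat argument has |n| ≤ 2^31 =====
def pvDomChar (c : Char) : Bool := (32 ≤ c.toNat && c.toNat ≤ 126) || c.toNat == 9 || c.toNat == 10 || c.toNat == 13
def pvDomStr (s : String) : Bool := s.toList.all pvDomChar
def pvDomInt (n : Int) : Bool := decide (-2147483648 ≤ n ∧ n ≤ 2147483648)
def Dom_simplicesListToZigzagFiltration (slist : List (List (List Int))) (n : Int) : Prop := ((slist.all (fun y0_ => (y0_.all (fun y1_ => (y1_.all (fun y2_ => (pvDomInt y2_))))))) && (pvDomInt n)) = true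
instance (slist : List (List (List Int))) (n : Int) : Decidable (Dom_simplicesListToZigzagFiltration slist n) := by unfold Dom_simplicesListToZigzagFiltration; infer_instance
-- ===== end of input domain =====

-- B replaces A's time-major incremental scan (with its repeated list.index searches) by a
-- simplex-major closed form built from per-complex occurrence counters (objective: alternative).

-- ===== PORT A =====
-- x[j] inside a sort key; Python raises IndexError on a too-short simplex, which
-- Pre_ excludes, so the default 0 is never used on admitted inputs.
def pvGetD0 (x : List Int) (j : Int) : Int := (PySem.List.pyGet? x j).getD 0
def pvKeyA0 (x : List Int) : List Int := [pvGetD0 x 0]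
def pvKeyA1 (x : List Int) : List Int := [pvGetD0 x 0, pvGetD0 x 1]
def pvKeyA2 (x : List Int) : List Int := [pvGetD0 x 0, pvGetD0 x 1, pvGetD0 x 2]
def pvKeyA3 (x : List Int) : List Int := [pvGetD0 x 0, pvGetD0 x 1, pvGetD0 x 2, pvGetD0 x 3]

-- the if/elif chain choosing the sort key; when n ∉ {0,1,2,3} Python keeps the previous aux
def pvAuxStep (n : Int) (prevAux sc : List (List Int)) : List (List Int) :=
  if n == 0 then PySem.List.sorted sc pvKeyA0
  else if n == 1 then PySem.List.sorted sc pvKeyA1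
  else if n == 2 then PySem.List.sorted sc pvKeyA2
  else if n == 3 then PySem.List.sorted sc pvKeyA3
  else prevAux

-- first loop of A: builds slistaux, carrying aux across iterations as Python does
def pvBuildAux (n : Int) (slist : List (List (List Int))) : List (List (List Int)) :=
  (slist.foldl (fun (st : List (List (List Int)) × List (List Int)) sc =>
      let aux := pvAuxStep n st.2 sc
      -- 'for i in range(len(aux)): aux[i] = list(aux[i])' — tuple→list; identity on the typed domain
      let aux := aux.map (fun s => s)
      (st.1 ++ [aux], aux)) ([], [])).1

structure pvStateA where
  total   : List (List Int)
  tset    : PySem.Set (List Int)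
  indices : List (List Int)
  prevL   : List (List Int)
  prevSet : List (List Int)    -- Python's previous_simplices_set: it is assigned the raw list sc
deriving Repr

-- body of "for s in slistaux[i]"
def pvStepNew (i : Int) (st : pvStateA) (s : List Int) : pvStateA :=
  if st.tset.contains s then
    -- 'tuple(s) in previous_simplices_set': value membership in the raw previous complex
    if !(st.prevSet.contains s) then
      match PySem.List.index? st.total s with
      | some k => { st with indices := st.indices.modify k (· ++ [i]) }
      | none   => st   -- unreachable: s ∈ tset implies s ∈ total
    else st
  else
    { st with total := st.total ++ [s], tset := st.tset.add s, indices := st.indices ++ [[i]] }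

-- body of "for s in previous_simplices_l"
def pvStepOld (i : Int) (sc : List (List Int)) (st : pvStateA) (s : List Int) : pvStateA :=
  if !(sc.contains s) then   -- 'tuple(s) in sc': value membership in the raw current complex
    match PySem.List.index? st.total s with
    | some k => { st with indices := st.indices.modify k (· ++ [i]) }
    | none   => st
  else st

-- body of "for i, sc in enumerate(slist)"
def pvStepComplexA (slistaux : List (List (List Int))) (st : pvStateA) (p : Int × List (List Int)) : pvStateA :=
  let i := p.1
  let sc := p.2
  let aux := (PySem.List.pyGet? slistaux i).getD []   -- slistaux[i]; i < len(slistaux) always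
  let st1 := aux.foldl (pvStepNew i) st
  let st2 := st1.prevL.foldl (pvStepOld i sc) st1
  { st2 with prevSet := sc, prevL := aux }

def simplicesListToZigzagFiltration (slist : List (List (List Int))) (n : Int) : List (List Int) × List (List Int) :=
  let slistaux := pvBuildAux n slist
  let fin := (PySem.List.enumerate slist).foldl (pvStepComplexA slistaux)
    ⟨[], PySem.Set.ofList [], [], [], []⟩
  (fin.total, fin.indices)

-- ===== PORT B =====
def pvKeyB (n : Int) (x : List Int) : List Int := PySem.List.slice x none (some (n + 1))

structure pvStateB1 where
  total : List (List Int)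
  seen  : PySem.Set (List Int)
  c     : PySem.Dict (List Int) Int
deriving Repr

structure pvStateB where
  total  : List (List Int)
  seen   : PySem.Set (List Int)
  counts : List (PySem.Dict (List Int) Int)
deriving Repr

def pvBStep1 (q : pvStateB1) (s : List Int) : pvStateB1 :=
  let q := if q.seen.contains s then q else { q with seen := q.seen.add s, total := q.total ++ [s] }
  { q with c := q.c.insert s (q.c.getD s 0 + 1) }

def pvBPhase1 (slistaux : List (List (List Int))) : pvStateB :=
  slistaux.foldl (fun st aux =>
      let r := aux.foldl pvBStep1 ⟨st.total, st.seen, PySem.Dict.empty⟩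
      ⟨r.total, r.seen, st.counts ++ [r.c]⟩)
    ⟨[], PySem.Set.ofList [], []⟩

def pvBIndexList (counts : List (PySem.Dict (List Int) Int)) (s : List Int) : List Int :=
  ((PySem.List.enumerate counts).foldl (fun (q : List Int × Int) ic =>
      let cur := ic.2.getD s 0
      (q.1 ++ PySem.List.pyRepeat [ic.1]
        ((if q.2 == 0 then cur else 0) + (if cur == 0 then q.2 else 0)), cur)) ([], 0)).1

def simplicesListToZigzagFiltration_alt (slist : List (List (List Int))) (n : Int) : List (List Int) × List (List Int) :=
  if 0 ≤ n ∧ n ≤ 3 then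
    let slistaux := slist.map (fun sc => (PySem.List.sorted sc (pvKeyB n)).map (fun s => s))
    let st := pvBPhase1 slistaux
    (st.total, st.total.map (pvBIndexList st.counts))
  else ([], [])

-- ===== PRECONDITION & SPEC =====
-- Pre_ excludes exactly the inputs where Python A raises IndexError: a dimension n ∈ {0,1,2,3}
-- together with some simplex shorter than n+1, whose sort key x[0..n] is then out of range.
def Pre_simplicesListToZigzagFiltration (slist : List (List (List Int))) (n : Int) : Prop :=
  (0 ≤ n ∧ n ≤ 3) → ∀ sc ∈ slist, ∀ s ∈ sc, n + 1 ≤ (s.length : Int)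
instance (slist : List (List (List Int))) (n : Int) : Decidable (Pre_simplicesListToZigzagFiltration slist n) := by unfold Pre_simplicesListToZigzagFiltration; infer_instance

def pvWitness_simplicesListToZigzagFiltration : List (List (List Int)) × Int := ([[[1, 2]], [[1, 2], [3, 4]]], 1)

def Spec_simplicesListToZigzagFiltration (slist : List (List (List Int))) (n : Int) (out : List (List Int) × List (List Int)) : Prop := out = simplicesListToZigzagFiltration_alt slist n
instance (slist : List (List (List Int))) (n : Int) (out : List (List Int) × List (List Int)) : Decidable (Spec_simplicesListToZigzagFiltration slist n out) := by unfold Spec_simplicesListToZigzagFiltration; infer_instance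

-- ===== CLAIM (what is proved, stated in full; the proofs are below) =====
def Claim_equal_simplicesListToZigzagFiltration : Prop := ∀ (slist : List (List (List Int))) (n : Int), Dom_simplicesListToZigzagFiltration slist n → Pre_simplicesListToZigzagFiltration slist n → Spec_simplicesListToZigzagFiltration slist n (simplicesListToZigzagFiltration slist n)


-- ===== LEMMAS AND PROOFS =====

-- the common mathematical shape of both results: first-appearance dedup of the sorted
-- complexes, and per simplex the step indices i with multiplicity
-- (occurrences in complex i) + (occurrences in complex i-1)
def pvMult (c prev : Nat) : Nat := (if prev = 0 then c else 0) + (if c = 0 then prev else 0)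

def pvIdxRec (t : List Int) : List (List (List Int)) → Int → Nat → List Int
  | [], _, _ => []
  | sc :: rest, k, prev =>
      List.replicate (pvMult (List.count t sc) prev) k ++ pvIdxRec t rest (k + 1) (List.count t sc)

-- small set/dedup facts
theorem pvOfList_snoc (xs : List (List Int)) (s : List Int) :
    PySem.Set.ofList (xs ++ [s]) = (PySem.Set.ofList xs).add s := by
  unfold PySem.Set.ofList; rw [List.foldl_append]; rfl

theorem pvAdd_eq (t : PySem.Set (List Int)) (s : List Int) :
    t.add s = if s ∈ t then t else t ++ [s] := by
  show (if t.contains s = true then t else t ++ [s]) = _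
  by_cases h : s ∈ t
  · rw [if_pos ((PySem.Set.contains_iff t s).mpr h), if_pos h]
  · rw [if_neg (fun hc => h ((PySem.Set.contains_iff t s).mp hc)), if_neg h]

theorem pvDedup_snoc (xs : List (List Int)) (s : List Int) :
    PySem.List.dedup (xs ++ [s]) =
      if s ∈ xs then PySem.List.dedup xs else PySem.List.dedup xs ++ [s] := by
  show PySem.Set.ofList (xs ++ [s]) = _
  rw [pvOfList_snoc, pvAdd_eq]
  simp [PySem.Set.mem_ofList]

theorem pvIndex_found {T : List (List Int)} {s : List Int} (hs : s ∈ T) :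
    ∃ k, PySem.List.index? T s = some k ∧ ∃ hk : k < T.length, T[k] = s := by
  have h1 := (PySem.List.index?_isSome_iff T s).mpr hs
  obtain ⟨k, hk⟩ := Option.isSome_iff_exists.mp h1
  obtain ⟨hlt, he, _⟩ := PySem.List.getElem_of_index?_eq_some hk
  exact ⟨k, hk, hlt, he⟩

theorem pvMapModify {T : List (List Int)} {s : List Int} (g : List Int → List Int)
    (upd : List Int → List Int) {k : Nat} (hN : T.Nodup) (hk : k < T.length) (hks : T[k] = s) :
    (T.map g).modify k upd = T.map (fun t => if t = s then upd (g t) else g t) := by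
  apply List.ext_getElem?
  intro j
  rw [List.getElem?_modify]
  by_cases hj : j < T.length
  · simp only [List.getElem?_map, List.getElem?_eq_getElem hj, Option.map_some]
    by_cases hkj : k = j
    · subst hkj; simp [hks]
    · have hne : T[j] ≠ s := by
        intro he
        exact hkj ((List.Nodup.getElem_inj_iff hN).mp (by rw [hks, he])).symm
      simp [hkj, hne]
  · have h1 : (T.map g)[j]? = none := by simp; omega
    have h2 : (T.map (fun t => if t = s then upd (g t) else g t))[j]? = none := by simp; omega
    rw [h1, h2]; rfl

theorem pvIdxRec_not_mem (t : List Int) :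
    ∀ (R : List (List (List Int))) (k : Int), (∀ sc ∈ R, t ∉ sc) → pvIdxRec t R k 0 = [] := by
  intro R
  induction R with
  | nil => intro k _; rfl
  | cons sc rest ih =>
      intro k h
      have h0 : List.count t sc = 0 := List.count_eq_zero.mpr (h sc (by simp))
      simp [pvIdxRec, pvMult, h0, ih (k + 1) (fun x hx => h x (by simp [hx]))]

def pvPrevC (t : List Int) : List (List (List Int))  → Nat → Nat
  | [], prev => prev
  | sc :: rest, _ => pvPrevC t rest (List.count t sc)

theorem pvPrevC_snoc (t : List Int) (sc : List (List Int)) :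
    ∀ (R : List (List (List Int))) (prev : Nat), pvPrevC t (R ++ [sc]) prev = List.count t sc := by
  intro R
  induction R with
  | nil => intro prev; rfl
  | cons c rest ih => intro prev; simpa [pvPrevC] using ih _

theorem pvIdxRec_snoc (t : List Int) (sc : List (List Int)) :
    ∀ (R : List (List (List Int))) (k : Int) (prev : Nat),
    pvIdxRec t (R ++ [sc]) k prev =
      pvIdxRec t R k prev ++
        List.replicate (pvMult (List.count t sc) (pvPrevC t R prev)) (k + (R.length : Int)) := by
  intro R
  induction R with
  | nil => intro k prev; simp [pvIdxRec, pvPrevC]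
  | cons c rest ih =>
      intro k prev
      simp only [List.cons_append, pvIdxRec, pvPrevC, ih, List.length_cons, List.append_assoc]
      congr 3
      push_cast; ring

-- ===== A-side loop invariants =====
theorem pvA_loop1 (i : Int) (X ps : List (List Int)) (pc : List Int → Nat)
    (hps : ∀ t, t ∈ ps ↔ 0 < pc t) (g : List Int → List Int)
    (hg : ∀ t, t ∉ X → g t = []) (hpc : ∀ t, t ∉ X → pc t = 0) :
    ∀ (q p : List (List Int)) (st : pvStateA),
    st.total = PySem.List.dedup (X ++ p) →
    st.tset = PySem.Set.ofList (X ++ p) →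
    st.prevSet = ps →
    st.indices = (PySem.List.dedup (X ++ p)).map
      (fun t => g t ++ List.replicate (if pc t = 0 then List.count t p else 0) i) →
    (q.foldl (pvStepNew i) st).total = PySem.List.dedup (X ++ (p ++ q)) ∧
    (q.foldl (pvStepNew i) st).tset = PySem.Set.ofList (X ++ (p ++ q)) ∧
    (q.foldl (pvStepNew i) st).indices = (PySem.List.dedup (X ++ (p ++ q))).map
      (fun t => g t ++ List.replicate (if pc t = 0 then List.count t (p ++ q) else 0) i) ∧
    (q.foldl (pvStepNew i) st).prevL = st.prevL ∧
    (q.foldl (pvStepNew i) st).prevSet = st.prevSet := by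
  intro q
  induction q with
  | nil =>
      intro p st h1 h2 hp h3
      refine ⟨?_, ?_, ?_, rfl, rfl⟩
      · show st.total = _; rw [h1]; simp
      · show st.tset = _; rw [h2]; simp
      · show st.indices = _; rw [h3]; simp
  | cons s q' ih =>
      intro p st h1 h2 hp h3
      rw [List.foldl_cons]
      by_cases hs : s ∈ X ++ p
      · -- s already recorded
        have hsD : s ∈ PySem.List.dedup (X ++ p) := (PySem.List.mem_dedup _ _).mpr hs
        obtain ⟨k, hidx, hk, hks⟩ := pvIndex_found hsD
        have hD : PySem.List.dedup (X ++ (p ++ [s])) = PySem.List.dedup (X ++ p) := by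
          rw [← List.append_assoc, pvDedup_snoc, if_pos hs]
        have hO : PySem.Set.ofList (X ++ (p ++ [s])) = PySem.Set.ofList (X ++ p) := by
          rw [← List.append_assoc, pvOfList_snoc, pvAdd_eq,
            if_pos ((PySem.Set.mem_ofList _ _).mpr hs)]
        by_cases hprev : s ∈ ps
        · -- s was in the previous complex: no index appended
          have hpcs : ¬ pc s = 0 := by have := (hps s).mp hprev; omega
          have hstep : pvStepNew i st s = st := by
            unfold pvStepNew
            rw [h2, if_pos ((PySem.Set.contains_iff _ _).mpr ((PySem.Set.mem_ofList _ _).mpr hs)),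
              hp]
            rw [(by simp [List.contains_iff_mem, hprev] :
              (!(ps.contains s)) = false)]
            simp
          rw [hstep]
          have hi : (PySem.List.dedup (X ++ (p ++ [s]))).map
              (fun t => g t ++ List.replicate (if pc t = 0 then List.count t (p ++ [s]) else 0) i) =
              (PySem.List.dedup (X ++ p)).map
              (fun t => g t ++ List.replicate (if pc t = 0 then List.count t p else 0) i) := by
            rw [hD]
            apply List.map_congr_left
            intro t _
            by_cases hts : t = s
            · subst hts; simp [hpcs]
            · have hb : (s == t) = false := beq_eq_false_iff_ne.mpr (Ne.symm hts)
              simp [List.count_append, List.count_singleton, hb]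
          have := ih (p ++ [s]) st (by rw [h1, hD]) (by rw [h2, hO]) hp (by rw [h3]; exact hi.symm)
          simpa [List.append_assoc] using this
        · -- s not in the previous complex: index i appended at s's slot
          have hpcs : pc s = 0 := by
            by_contra hcc
            exact hprev ((hps s).mpr (by omega))
          have hstep : pvStepNew i st s =
              { st with indices := ((PySem.List.dedup (X ++ p)).map
                  (fun t => if t = s then
                      (g t ++ List.replicate (if pc t = 0 then List.count t p else 0) i) ++ [i]
                    else g t ++ List.replicate (if pc t = 0 then List.count t p else 0) i)) } := by
            unfold pvStepNew
            rw [h2, if_pos ((PySem.Set.contains_iff _ _).mpr ((PySem.Set.mem_ofList _ _).mpr hs)),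
              hp]
            rw [(by simp [List.contains_iff_mem, hprev] : (!(ps.contains s)) = true)]
            rw [if_pos rfl, h1, hidx]
            show ({ st with total := PySem.List.dedup (X ++ p),
                            tset := PySem.Set.ofList (X ++ p),
                            prevSet := ps,
                            indices := st.indices.modify k (· ++ [i]) } : pvStateA) = _
            rw [h3, pvMapModify
              (fun t => g t ++ List.replicate (if pc t = 0 then List.count t p else 0) i)
              (· ++ [i]) (PySem.List.nodup_dedup _) hk hks]
          rw [hstep]
          have hi : (PySem.List.dedup (X ++ (p ++ [s]))).map
              (fun t => g t ++ List.replicate (if pc t = 0 then List.count t (p ++ [s]) else 0) i) =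
              (PySem.List.dedup (X ++ p)).map
                  (fun t => if t = s then
                      (g t ++ List.replicate (if pc t = 0 then List.count t p else 0) i) ++ [i]
                    else g t ++ List.replicate (if pc t = 0 then List.count t p else 0) i) := by
            rw [hD]
            apply List.map_congr_left
            intro t _
            by_cases hts : t = s
            · subst hts
              simp [hpcs, List.count_append, List.count_singleton, List.append_assoc,
                List.replicate_add]
            · have hb : (s == t) = false := beq_eq_false_iff_ne.mpr (Ne.symm hts)
              simp [List.count_append, List.count_singleton, hb, hts]
          have := ih (p ++ [s])
            { st with indices := ((PySem.List.dedup (X ++ p)).map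
                  (fun t => if t = s then
                      (g t ++ List.replicate (if pc t = 0 then List.count t p else 0) i) ++ [i]
                    else g t ++ List.replicate (if pc t = 0 then List.count t p else 0) i)) }
            (by show st.total = _; rw [h1, hD]) (by show st.tset = _; rw [h2, hO])
            (by show st.prevSet = _; rw [hp]) (by show _ = _; rw [hi])
          simpa [List.append_assoc] using this
      · -- a brand-new simplex
        have hsX : s ∉ X := fun hx => hs (by simp [hx])
        have hsp : s ∉ p := fun hx => hs (by simp [hx])
        have hstep : pvStepNew i st s =
            { st with total := st.total ++ [s], tset := st.tset.add s,
                      indices := st.indices ++ [[i]] } := by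
          unfold pvStepNew
          rw [h2, if_neg]
          intro hc
          exact hs ((PySem.Set.mem_ofList _ _).mp ((PySem.Set.contains_iff _ _).mp hc))
        rw [hstep]
        have hD : PySem.List.dedup (X ++ (p ++ [s])) = PySem.List.dedup (X ++ p) ++ [s] := by
          rw [← List.append_assoc, pvDedup_snoc, if_neg hs]
        have hO : PySem.Set.ofList (X ++ (p ++ [s])) = (PySem.Set.ofList (X ++ p)).add s := by
          rw [← List.append_assoc, pvOfList_snoc]
        have hi : (PySem.List.dedup (X ++ (p ++ [s]))).map
            (fun t => g t ++ List.replicate (if pc t = 0 then List.count t (p ++ [s]) else 0) i) =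
            (PySem.List.dedup (X ++ p)).map
              (fun t => g t ++ List.replicate (if pc t = 0 then List.count t p else 0) i) ++ [[i]] := by
          rw [hD, List.map_append]
          congr 1
          · apply List.map_congr_left
            intro t ht
            have htm : t ∈ X ++ p := (PySem.List.mem_dedup _ _).mp ht
            have hts : t ≠ s := fun he => hs (he ▸ htm)
            have hb : (s == t) = false := beq_eq_false_iff_ne.mpr (Ne.symm hts)
            simp [List.count_append, List.count_singleton, hb]
          · have hg0 : g s = [] := hg s hsX
            have hc0 : List.count s p = 0 := List.count_eq_zero.mpr hsp
            simp [List.count_append, List.count_singleton, hg0, hc0, hpc s hsX]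
        have := ih (p ++ [s])
          { st with total := st.total ++ [s], tset := st.tset.add s,
                    indices := st.indices ++ [[i]] }
          (by show st.total ++ [s] = _; rw [h1, hD]) (by show st.tset.add s = _; rw [h2, hO])
          (by show st.prevSet = _; rw [hp]) (by show st.indices ++ [[i]] = _; rw [h3, hi])
        simpa [List.append_assoc] using this

theorem pvA_loop2 (i : Int) (sc : List (List Int)) (T : List (List Int)) (hN : T.Nodup) :
    ∀ (prev : List (List Int)) (g : List Int → List Int) (st : pvStateA),
    st.total = T → st.indices = T.map g → (∀ s ∈ prev, s ∈ T) →
    (prev.foldl (pvStepOld i sc) st).total = T ∧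
    (prev.foldl (pvStepOld i sc) st).tset = st.tset ∧
    (prev.foldl (pvStepOld i sc) st).prevL = st.prevL ∧
    (prev.foldl (pvStepOld i sc) st).prevSet = st.prevSet ∧
    (prev.foldl (pvStepOld i sc) st).indices =
      T.map (fun t => g t ++ List.replicate (if t ∈ sc then 0 else List.count t prev) i) := by
  intro prev
  induction prev with
  | nil =>
      intro g st h1 h2 _
      refine ⟨h1, rfl, rfl, rfl, ?_⟩
      show st.indices = _
      rw [h2]; simp
  | cons s pr ih =>
      intro g st h1 h2 hmem
      have hsT : s ∈ T := hmem s (by simp)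
      obtain ⟨k, hidx, hk, hks⟩ := pvIndex_found hsT
      rw [List.foldl_cons]
      by_cases hsc : s ∈ sc
      · -- s still present in the current complex: nothing appended
        have hstep : pvStepOld i sc st s = st := by
          unfold pvStepOld
          rw [(by simp [List.contains_iff_mem, hsc] : (!(sc.contains s)) = false)]
          simp
        rw [hstep]
        obtain ⟨c1, c2, c3, c4, c5⟩ := ih g st h1 h2 (fun x hx => hmem x (by simp [hx]))
        refine ⟨c1, c2, c3, c4, ?_⟩
        rw [c5]
        apply List.map_congr_left
        intro t _
        by_cases hts : t = s
        · subst hts; simp [hsc]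
        · have hb : (s == t) = false := beq_eq_false_iff_ne.mpr (Ne.symm hts)
          simp [List.count_cons, hb]
      · -- s left the complex: index i appended at s's slot
        have hstep : pvStepOld i sc st s =
            { st with indices := T.map (fun t => if t = s then g t ++ [i] else g t) } := by
          unfold pvStepOld
          rw [(by simp [List.contains_iff_mem, hsc] : (!(sc.contains s)) = true)]
          rw [if_pos rfl, h1, hidx]
          show ({ total := T, tset := st.tset, indices := st.indices.modify k (· ++ [i]),
                  prevL := st.prevL, prevSet := st.prevSet } : pvStateA) = _
          rw [h2, pvMapModify g (· ++ [i]) hN hk hks]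
        rw [hstep]
        obtain ⟨c1, c2, c3, c4, c5⟩ := ih (fun t => if t = s then g t ++ [i] else g t)
          { st with indices := T.map (fun t => if t = s then g t ++ [i] else g t) }
          h1 rfl (fun x hx => hmem x (by simp [hx]))
        refine ⟨c1, c2, c3, c4, ?_⟩
        rw [c5]
        apply List.map_congr_left
        intro t _
        by_cases hts : t = s
        · subst hts
          simp only [eq_self_iff_true, if_true, if_neg hsc, List.count_cons_self,
            List.append_assoc, List.singleton_append, List.replicate_succ]
        · have hb : (s == t) = false := beq_eq_false_iff_ne.mpr (Ne.symm hts)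
          simp [List.count_cons, hb, hts]

def pvFlat (L : List (List (List Int))) (m : Nat) : List (List Int) := (L.take m).flatten
def pvTot (L : List (List (List Int))) (m : Nat) : List (List Int) := PySem.List.dedup (pvFlat L m)

def pvInvA (slist L : List (List (List Int))) (k : Nat) (st : pvStateA) : Prop :=
  st.total = pvTot L k ∧
  st.tset = PySem.Set.ofList (pvFlat L k) ∧
  st.indices = (pvTot L k).map (fun t => pvIdxRec t (L.take k) 0 0) ∧
  st.prevL = (if k = 0 then [] else L.getD (k - 1) []) ∧
  st.prevSet = (if k = 0 then [] else slist.getD (k - 1) [])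

theorem pvFlat_succ (L : List (List (List Int))) (k : Nat) (hk : k < L.length) :
    pvFlat L (k + 1) = pvFlat L k ++ L.getD k [] := by
  unfold pvFlat
  rw [List.take_add_one, List.flatten_append]
  congr 1
  rw [List.getElem?_eq_getElem hk]
  simp [List.getD, List.getElem?_eq_getElem hk]

theorem pvTake_succ (L : List (List (List Int))) (k : Nat) (hk : k < L.length) :
    L.take (k + 1) = L.take k ++ [L.getD k []] := by
  rw [List.take_add_one, List.getElem?_eq_getElem hk]
  simp [List.getD, List.getElem?_eq_getElem hk]

theorem pvMemFlat (L : List (List (List Int))) (k j : Nat) (hj : j < k) (hk : k ≤ L.length)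
    {t : List Int} (ht : t ∈ L.getD j []) : t ∈ pvFlat L k := by
  apply List.mem_flatten.mpr
  refine ⟨L.getD j [], ?_, ht⟩
  have hjL : j < L.length := by omega
  have hlen : j < (L.take k).length := by simp; omega
  have hmem : (L.take k)[j]'hlen ∈ L.take k := List.getElem_mem hlen
  have he : (L.take k)[j]'hlen = L.getD j [] := by
    rw [List.getElem_take]
    simp [List.getD, List.getElem?_eq_getElem hjL]
  rwa [he] at hmem

theorem pvA_step (slist L : List (List (List Int))) (k : Nat) (hk : k < L.length)
    (hmem : ∀ j t, t ∈ slist.getD j [] ↔ 0 < List.count t (L.getD j []))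
    (sc : List (List Int)) (hsc : sc = slist.getD k [])
    (st : pvStateA) (h : pvInvA slist L k st) :
    pvInvA slist L (k + 1) (pvStepComplexA L st ((k : Int), sc)) := by
  obtain ⟨h1, h2, h3, h4, h5⟩ := h
  have hauxE : ((PySem.List.pyGet? L ((k : Nat) : Int)).getD [] : List (List Int)) = L.getD k [] :=
    PySem.List.pyGetD_natCast L k []
  have hg : ∀ t, t ∉ pvFlat L k → pvIdxRec t (L.take k) 0 0 = [] := by
    intro t ht
    apply pvIdxRec_not_mem
    intro scc hscc hmm
    exact ht (List.mem_flatten.mpr ⟨scc, hscc, hmm⟩)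
  -- the per-simplex count in the previous complex
  have hpc : ∀ t, t ∉ pvFlat L k →
      List.count t (if k = 0 then ([] : List (List Int)) else L.getD (k - 1) []) = 0 := by
    intro t ht
    by_cases hk0 : k = 0
    · simp [hk0]
    · rw [if_neg hk0]
      apply List.count_eq_zero.mpr
      intro hcc
      exact ht (pvMemFlat L k (k - 1) (by omega) (by omega) hcc)
  have hps : ∀ t, t ∈ (if k = 0 then ([] : List (List Int)) else slist.getD (k - 1) []) ↔
      0 < List.count t (if k = 0 then ([] : List (List Int)) else L.getD (k - 1) []) := by
    intro t
    by_cases hk0 : k = 0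
    · simp [hk0]
    · rw [if_neg hk0, if_neg hk0]
      exact hmem (k - 1) t
  have hl1 := pvA_loop1 ((k : Nat) : Int) (pvFlat L k)
    (if k = 0 then ([] : List (List Int)) else slist.getD (k - 1) [])
    (fun t => List.count t (if k = 0 then ([] : List (List Int)) else L.getD (k - 1) []))
    hps (fun t => pvIdxRec t (L.take k) 0 0) hg hpc
    (L.getD k []) [] st (by rw [h1]; simp [pvTot]) (by rw [h2]; simp) h5
    (by rw [h3]; simp [pvTot])
  obtain ⟨a1, a2, a3, a4, a5⟩ := hl1
  simp only [List.nil_append] at a1 a2 a3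
  have hprevmem : ∀ s ∈ st.prevL, s ∈ PySem.List.dedup (pvFlat L k ++ L.getD k []) := by
    intro s hs
    rw [h4] at hs
    by_cases hk0 : k = 0
    · rw [if_pos hk0] at hs; simp at hs
    · rw [if_neg hk0] at hs
      apply (PySem.List.mem_dedup _ _).mpr
      exact List.mem_append_left _ (pvMemFlat L k (k - 1) (by omega) (by omega) hs)
  have hl2 := pvA_loop2 ((k : Nat) : Int) sc (PySem.List.dedup (pvFlat L k ++ L.getD k []))
    (PySem.List.nodup_dedup _)
    st.prevL
    (fun t => pvIdxRec t (L.take k) 0 0 ++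
      List.replicate (if List.count t (if k = 0 then ([] : List (List Int)) else L.getD (k - 1) []) = 0
        then List.count t (L.getD k []) else 0) ((k : Nat) : Int))
    (List.foldl (pvStepNew ((k : Nat) : Int)) st (L.getD k [])) a1 a3 hprevmem
  obtain ⟨c1, c2, c3, c4, c5⟩ := hl2
  have hflat : pvFlat L (k + 1) = pvFlat L k ++ L.getD k [] := pvFlat_succ L k hk
  have hpcC : ∀ t, pvPrevC t (L.take k) 0 =
      List.count t (if k = 0 then ([] : List (List Int)) else L.getD (k - 1) []) := by
    intro t
    by_cases hk0 : k = 0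
    · subst hk0; simp [pvPrevC]
    · have htk : L.take k = L.take (k - 1) ++ [L.getD (k - 1) []] := by
        have := pvTake_succ L (k - 1) (by omega)
        rwa [Nat.sub_add_cancel (by omega)] at this
      rw [htk, pvPrevC_snoc, if_neg hk0]
  have hcount : ∀ t, List.count t st.prevL =
      List.count t (if k = 0 then ([] : List (List Int)) else L.getD (k - 1) []) := by
    intro t
    rw [h4]
  have hfun : ∀ t, pvIdxRec t (L.take (k + 1)) 0 0 =
      (pvIdxRec t (L.take k) 0 0 ++
        List.replicate (if List.count t (if k = 0 then ([] : List (List Int)) else L.getD (k - 1) []) = 0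
          then List.count t (L.getD k []) else 0) ((k : Nat) : Int))
      ++ List.replicate (if t ∈ sc then 0 else List.count t st.prevL) ((k : Nat) : Int) := by
    intro t
    rw [pvTake_succ L k hk, pvIdxRec_snoc, hpcC t]
    have hlen : ((L.take k).length : Int) = (k : Int) := by
      rw [List.length_take_of_le (le_of_lt hk)]
    rw [hlen]
    have hscm : (t ∈ sc) ↔ 0 < List.count t (L.getD k []) := by rw [hsc]; exact hmem k t
    have : (if t ∈ sc then 0 else List.count t st.prevL) =
        (if List.count t (L.getD k []) = 0 then
          List.count t (if k = 0 then ([] : List (List Int)) else L.getD (k - 1) []) else 0) := by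
      by_cases hc : List.count t (L.getD k []) = 0
      · have hnin : t ∉ sc := fun hin => by have := hscm.mp hin; omega
        rw [if_pos hc, if_neg hnin, hcount t]
      · have hin : t ∈ sc := hscm.mpr (by omega)
        rw [if_neg hc, if_pos hin]
    rw [this, pvMult, List.replicate_add, ← List.append_assoc]
    norm_num
  unfold pvStepComplexA
  simp only [hauxE, a4]
  refine ⟨?_, ?_, ?_, ?_, ?_⟩
  · show (List.foldl (pvStepOld _ sc) _ st.prevL).total = _
    rw [c1]
    unfold pvTot
    rw [hflat]
  · show (List.foldl (pvStepOld _ sc) _ st.prevL).tset = _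
    rw [c2, a2, hflat]
  · show (List.foldl (pvStepOld _ sc) _ st.prevL).indices = _
    rw [c5]
    unfold pvTot
    rw [hflat]
    apply List.map_congr_left
    intro t _
    rw [hfun t]
  · show L.getD k [] = _
    simp
  · show sc = _
    simp [hsc]

theorem pvA_loopMain (slist L : List (List (List Int)))
    (hmem : ∀ j t, t ∈ slist.getD j [] ↔ 0 < List.count t (L.getD j []))
    (hlen : L.length = slist.length) :
    ∀ (ss : List (List (List Int))) (k : Nat) (st : pvStateA),
    ss = slist.drop k → k ≤ slist.length →
    pvInvA slist L k st →
    pvInvA slist L L.length ((PySem.List.enumerate ss (k : Int)).foldl (pvStepComplexA L) st) := by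
  intro ss
  induction ss with
  | nil =>
      intro k st hss hkle h
      have hge : k ≥ slist.length := by
        by_contra hcc
        have := congrArg List.length hss
        simp at this
        omega
      have hkL : L.length = k := by omega
      rwa [hkL]
  | cons sc rest ih =>
      intro k st hss hkle h
      have hk : k < slist.length := by
        by_contra hcc
        rw [List.drop_eq_nil_of_le (by omega)] at hss
        simp at hss
      have hkL : k < L.length := by omega
      have hsc : sc = slist.getD k [] := by
        have h0 := congrArg (fun l => l.getD 0 ([] : List (List Int))) hss
        simp only [List.getD_cons_zero] at h0
        rw [h0]
        simp [List.getD, List.getElem?_drop, List.getElem?_eq_getElem hk]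
      have hrest : rest = slist.drop (k + 1) := by
        have := congrArg List.tail hss
        simpa [List.tail_drop] using this
      have hstep := pvA_step slist L k hkL hmem sc hsc st h
      have henum : PySem.List.enumerate (sc :: rest) (k : Int) =
          ((k : Int), sc) :: PySem.List.enumerate rest ((k : Int) + 1) := rfl
      rw [henum, List.foldl_cons]
      have hcast : ((k : Int) + 1) = ((k + 1 : Nat) : Int) := by push_cast; ring
      rw [hcast]
      exact ih (k + 1) _ hrest (by omega) hstep

theorem pv_main_A (L : List (List (List Int))) (slist : List (List (List Int))) (n : Int)
    (hL : pvBuildAux n slist = L) (hlen : L.length = slist.length)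
    (hmem : ∀ j t, t ∈ slist.getD j [] ↔ 0 < List.count t (L.getD j [])) :
    simplicesListToZigzagFiltration slist n =
      (pvTot L L.length, (pvTot L L.length).map (fun t => pvIdxRec t L 0 0)) := by
  have h0 : pvInvA slist L 0 ⟨[], PySem.Set.ofList [], [], [], []⟩ :=
    ⟨rfl, rfl, rfl, rfl, rfl⟩
  have hmain := pvA_loopMain slist L hmem hlen slist 0 _ (by simp) (by omega) h0
  rw [Nat.cast_zero] at hmain
  obtain ⟨h1, h2, h3, h4, h5⟩ := hmain
  rw [List.take_length] at h3
  show ((List.foldl (pvStepComplexA (pvBuildAux n slist)) _ _).total,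
        (List.foldl (pvStepComplexA (pvBuildAux n slist)) _ _).indices) = _
  rw [hL]
  exact Prod.ext (by simpa using h1) (by simpa using h3)

-- ===== B-side =====
theorem pvB1_loop :
    ∀ (aux : List (List Int)) (X : List (List Int)) (q : pvStateB1),
    q.total = PySem.List.dedup X → q.seen = PySem.Set.ofList X →
    (aux.foldl pvBStep1 q).total = PySem.List.dedup (X ++ aux) ∧
    (aux.foldl pvBStep1 q).seen = PySem.Set.ofList (X ++ aux) ∧
    ∀ t, (aux.foldl pvBStep1 q).c.getD t 0 = q.c.getD t 0 + (List.count t aux : Int) := by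
  intro aux
  induction aux with
  | nil =>
      intro X q h1 h2
      refine ⟨by simpa using h1, by simpa using h2, fun t => by simp⟩
  | cons s rest ih =>
      intro X q h1 h2
      rw [List.foldl_cons]
      by_cases hm : s ∈ X
      · have hc : s ∈ q.seen := by
          rw [h2]; exact (PySem.Set.mem_ofList _ _).mpr hm
        have hstep : pvBStep1 q s = ⟨q.total, q.seen, q.c.insert s (q.c.getD s 0 + 1)⟩ := by
          unfold pvBStep1
          simp [hc]
        rw [hstep]
        have := ih (X ++ [s]) ⟨q.total, q.seen, q.c.insert s (q.c.getD s 0 + 1)⟩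
          (by show q.total = _; rw [h1, pvDedup_snoc, if_pos hm])
          (by show q.seen = _; rw [h2, pvOfList_snoc, pvAdd_eq,
            if_pos ((PySem.Set.mem_ofList _ _).mpr hm)])
        obtain ⟨b1, b2, b3⟩ := this
        refine ⟨by rw [b1]; simp, by rw [b2]; simp, fun t => ?_⟩
        rw [b3 t]
        show (q.c.insert s (q.c.getD s 0 + 1)).getD t 0 + _ = _
        rw [PySem.Dict.getD_insert]
        by_cases hts : t = s
        · subst hts; rw [List.count_cons_self, if_pos rfl]; push_cast; ring
        · have hb : (s == t) = false := beq_eq_false_iff_ne.mpr (Ne.symm hts)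
          simp [hts, List.count_cons, hb]
      · have hstep : pvBStep1 q s =
            ⟨q.total ++ [s], q.seen.add s, q.c.insert s (q.c.getD s 0 + 1)⟩ := by
          have hc : s ∉ q.seen := by
            rw [h2]
            exact fun hcc => hm ((PySem.Set.mem_ofList _ _).mp hcc)
          unfold pvBStep1
          simp [hc]
        rw [hstep]
        have := ih (X ++ [s]) ⟨q.total ++ [s], q.seen.add s, q.c.insert s (q.c.getD s 0 + 1)⟩
          (by show q.total ++ [s] = _; rw [h1, pvDedup_snoc, if_neg hm])
          (by show q.seen.add s = _; rw [h2, pvOfList_snoc])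
        obtain ⟨b1, b2, b3⟩ := this
        refine ⟨by rw [b1]; simp, by rw [b2]; simp, fun t => ?_⟩
        rw [b3 t]
        show (q.c.insert s (q.c.getD s 0 + 1)).getD t 0 + _ = _
        rw [PySem.Dict.getD_insert]
        by_cases hts : t = s
        · subst hts; rw [List.count_cons_self, if_pos rfl]; push_cast; ring
        · have hb : (s == t) = false := beq_eq_false_iff_ne.mpr (Ne.symm hts)
          simp [hts, List.count_cons, hb]

def pvChainD (s : List Int) : List (PySem.Dict (List Int) Int) → Int → Int → List Int
  | [], _, _ => []
  | c :: cs, k, prev =>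
      PySem.List.pyRepeat [k]
        ((if prev == 0 then c.getD s 0 else 0) + (if c.getD s 0 == 0 then prev else 0)) ++
        pvChainD s cs (k + 1) (c.getD s 0)

theorem pvB_chain (s : List Int) :
    ∀ (cs : List (PySem.Dict (List Int) Int)) (k : Int) (acc : List Int) (prev : Int),
    ((PySem.List.enumerate cs k).foldl (fun (q : List Int × Int) ic =>
        (q.1 ++ PySem.List.pyRepeat [ic.1]
          ((if q.2 == 0 then ic.2.getD s 0 else 0) + (if ic.2.getD s 0 == 0 then q.2 else 0)),
         ic.2.getD s 0)) (acc, prev)).1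
      = acc ++ pvChainD s cs k prev := by
  intro cs
  induction cs with
  | nil => intro k acc prev; simp [pvChainD, PySem.List.enumerate]
  | cons c rest ih =>
      intro k acc prev
      have : PySem.List.enumerate (c :: rest) k = (k, c) :: PySem.List.enumerate rest (k + 1) := rfl
      rw [this, List.foldl_cons]
      simp only [pvChainD]
      rw [ih]
      simp [List.append_assoc]

theorem pvChain_idx (s : List Int) :
    ∀ (R : List (List (List Int))) (cs : List (PySem.Dict (List Int) Int)) (k : Int) (pn : Nat),
    cs.length = R.length →
    (∀ j, j < cs.length →
      (cs.getD j PySem.Dict.empty).getD s 0 = (List.count s (R.getD j []) : Int)) →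
    pvChainD s cs k (pn : Int) = pvIdxRec s R k pn := by
  intro R
  induction R with
  | nil =>
      intro cs k pn hlen _
      have : cs = [] := List.length_eq_zero_iff.mp (by simpa using hlen)
      subst this; rfl
  | cons sc rest ih =>
      intro cs k pn hlen h
      match cs with
      | c :: cs' =>
        have h0 : c.getD s 0 = (List.count s sc : Int) := by simpa using h 0 (by simp)
        simp only [pvChainD, pvIdxRec]
        rw [h0, PySem.List.pyRepeat_singleton]
        have hrep : ((if ((pn : Int) == 0) = true then (List.count s sc : Int) else 0) +
            (if ((List.count s sc : Int) == 0) = true then (pn : Int) else 0)).toNat =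
            pvMult (List.count s sc) pn := by
          unfold pvMult
          by_cases hp : pn = 0 <;> by_cases hc : List.count s sc = 0 <;>
            simp [hp, hc]
        rw [hrep]
        congr 1
        exact ih cs' (k + 1) (List.count s sc) (by simpa using hlen)
          (fun j hj => by simpa using h (j + 1) (by simp; omega))

theorem pvB_phase1_loop :
    ∀ (R P : List (List (List Int))) (st : pvStateB),
    st.total = PySem.List.dedup P.flatten →
    st.seen = PySem.Set.ofList P.flatten →
    st.counts.length = P.length →
    (∀ j, j < P.length → ∀ t,
      (st.counts.getD j PySem.Dict.empty).getD t 0 = (List.count t (P.getD j []) : Int)) →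
    (R.foldl (fun st aux =>
        let r := aux.foldl pvBStep1 ⟨st.total, st.seen, PySem.Dict.empty⟩
        ⟨r.total, r.seen, st.counts ++ [r.c]⟩) st).total = PySem.List.dedup (P ++ R).flatten ∧
    (R.foldl (fun st aux =>
        let r := aux.foldl pvBStep1 ⟨st.total, st.seen, PySem.Dict.empty⟩
        ⟨r.total, r.seen, st.counts ++ [r.c]⟩) st).counts.length = (P ++ R).length ∧
    (∀ j, j < (P ++ R).length → ∀ t,
      ((R.foldl (fun st aux =>
        let r := aux.foldl pvBStep1 ⟨st.total, st.seen, PySem.Dict.empty⟩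
        ⟨r.total, r.seen, st.counts ++ [r.c]⟩) st).counts.getD j PySem.Dict.empty).getD t 0
        = (List.count t ((P ++ R).getD j []) : Int)) := by
  intro R
  induction R with
  | nil =>
      intro P st h1 h2 h3 h4
      simp only [List.foldl_nil, List.append_nil]
      exact ⟨h1, h3, h4⟩
  | cons aux R' ih =>
      intro P st h1 h2 h3 h4
      rw [List.foldl_cons]
      obtain ⟨b1, b2, b3⟩ := pvB1_loop aux P.flatten ⟨st.total, st.seen, PySem.Dict.empty⟩ h1 h2
      have hflat : (P ++ [aux]).flatten = P.flatten ++ aux := by simp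
      have := ih (P ++ [aux])
        ⟨(List.foldl pvBStep1 ⟨st.total, st.seen, PySem.Dict.empty⟩ aux).total,
         (List.foldl pvBStep1 ⟨st.total, st.seen, PySem.Dict.empty⟩ aux).seen,
         st.counts ++ [(List.foldl pvBStep1 ⟨st.total, st.seen, PySem.Dict.empty⟩ aux).c]⟩
        (by show _ = _; rw [b1, hflat]) (by show _ = _; rw [b2, hflat])
        (by show (st.counts ++ _).length = _; simp [h3])
        (by
          intro j hj t
          show ((st.counts ++ [(List.foldl pvBStep1 ⟨st.total, st.seen, PySem.Dict.empty⟩ aux).c]).getD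
            j PySem.Dict.empty).getD t 0 = _
          simp only [List.length_append, List.length_singleton] at hj
          by_cases hjP : j < P.length
          · have e1 : (st.counts ++ [(List.foldl pvBStep1 ⟨st.total, st.seen, PySem.Dict.empty⟩ aux).c]).getD
                j PySem.Dict.empty = st.counts.getD j PySem.Dict.empty := by
              simp [List.getD, List.getElem?_append_left (h3 ▸ hjP)]
            have e2 : (P ++ [aux]).getD j [] = P.getD j [] := by
              simp [List.getD, List.getElem?_append_left hjP]
            rw [e1, e2]
            exact h4 j hjP t
          · have hjE : j = P.length := by omega
            subst hjE
            have e1 : (st.counts ++ [(List.foldl pvBStep1 ⟨st.total, st.seen, PySem.Dict.empty⟩ aux).c]).getD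
                P.length PySem.Dict.empty = (List.foldl pvBStep1 ⟨st.total, st.seen, PySem.Dict.empty⟩ aux).c := by
              rw [← h3]
              simp [List.getD, List.getElem?_append_right (le_refl _)]
            have e2 : (P ++ [aux]).getD P.length [] = aux := by
              simp [List.getD, List.getElem?_append_right (le_refl _)]
            rw [e1, e2, b3 t]
            show (PySem.Dict.empty.getD t 0) + _ = _
            simp [PySem.Dict.empty, PySem.Dict.getD, PySem.Dict.get?])
      obtain ⟨d1, d2, d3⟩ := this
      refine ⟨?_, ?_, ?_⟩
      · rw [d1]; simp
      · rw [d2]; simp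
      · intro j hj t
        have := d3 j (by simpa using hj) t
        rw [this]
        congr 2
        simp

theorem pv_main_B (L : List (List (List Int))) :
    (pvBPhase1 L).total = pvTot L L.length ∧
    ∀ s, pvBIndexList (pvBPhase1 L).counts s = pvIdxRec s L 0 0 := by
  have h := pvB_phase1_loop L [] ⟨[], PySem.Set.ofList [], []⟩ rfl rfl rfl (by intro j hj; simp at hj)
  obtain ⟨h1, h2, h3⟩ := h
  simp only [List.nil_append] at h1 h2 h3
  constructor
  · show (pvBPhase1 L).total = _
    rw [show pvBPhase1 L = (L.foldl (fun st aux =>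
        let r := aux.foldl pvBStep1 ⟨st.total, st.seen, PySem.Dict.empty⟩
        ⟨r.total, r.seen, st.counts ++ [r.c]⟩) ⟨[], PySem.Set.ofList [], []⟩) from rfl]
    rw [h1]
    simp [pvTot, pvFlat]
  · intro s
    show (pvBIndexList (pvBPhase1 L).counts s) = _
    unfold pvBIndexList
    rw [pvB_chain]
    rw [List.nil_append]
    exact pvChain_idx s L _ 0 0
      (by rw [show pvBPhase1 L = (L.foldl (fun st aux =>
          let r := aux.foldl pvBStep1 ⟨st.total, st.seen, PySem.Dict.empty⟩
          ⟨r.total, r.seen, st.counts ++ [r.c]⟩) ⟨[], PySem.Set.ofList [], []⟩) from rfl, h2])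
      (fun j hj => by
        have := h3 j (by
          rw [show pvBPhase1 L = (L.foldl (fun st aux =>
            let r := aux.foldl pvBStep1 ⟨st.total, st.seen, PySem.Dict.empty⟩
            ⟨r.total, r.seen, st.counts ++ [r.c]⟩) ⟨[], PySem.Set.ofList [], []⟩) from rfl, h2] at hj
          exact hj) s
        exact this)

-- ===== slistaux equality =====
theorem pvAuxStep_indep (n : Int) (hn : 0 ≤ n ∧ n ≤ 3) (a b sc : List (List Int)) :
    pvAuxStep n a sc = pvAuxStep n b sc := by
  obtain ⟨h0, h3⟩ := hn
  unfold pvAuxStep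
  interval_cases n <;> simp

theorem pvBuildAux_in (n : Int) (hn : 0 ≤ n ∧ n ≤ 3) (slist : List (List (List Int))) :
    pvBuildAux n slist = slist.map (fun sc => (pvAuxStep n [] sc).map (fun s => s)) := by
  unfold pvBuildAux
  suffices h : ∀ (ss : List (List (List Int))) (acc : List (List (List Int))) (a : List (List Int)),
      (ss.foldl (fun (st : List (List (List Int)) × List (List Int)) sc =>
        (st.1 ++ [(pvAuxStep n st.2 sc).map (fun s => s)], (pvAuxStep n st.2 sc).map (fun s => s)))
        (acc, a)).1 = acc ++ ss.map (fun sc => (pvAuxStep n [] sc).map (fun s => s)) by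
    simpa using h slist [] []
  intro ss
  induction ss with
  | nil => intro acc a; simp
  | cons sc rest ih =>
      intro acc a
      rw [List.foldl_cons]
      rw [ih]
      rw [pvAuxStep_indep n hn a []]
      simp

theorem pvBuildAux_out (n : Int) (hn : ¬(0 ≤ n ∧ n ≤ 3)) (slist : List (List (List Int))) :
    pvBuildAux n slist = slist.map (fun _ => []) := by
  have hstep : ∀ sc, pvAuxStep n [] sc = [] := by
    intro sc
    have e0 : (n == 0) = false := by simp [beq_iff_eq]; omega
    have e1 : (n == 1) = false := by simp [beq_iff_eq]; omega
    have e2 : (n == 2) = false := by simp [beq_iff_eq]; omega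
    have e3 : (n == 3) = false := by simp [beq_iff_eq]; omega
    simp [pvAuxStep, e0, e1, e2, e3]
  unfold pvBuildAux
  suffices h : ∀ (ss : List (List (List Int))) (acc : List (List (List Int))),
      (ss.foldl (fun (st : List (List (List Int)) × List (List Int)) sc =>
        (st.1 ++ [(pvAuxStep n st.2 sc).map (fun s => s)], (pvAuxStep n st.2 sc).map (fun s => s)))
        (acc, [])).1 = acc ++ ss.map (fun _ => []) by
    simpa using h slist []
  intro ss
  induction ss with
  | nil => intro acc; simp
  | cons sc rest ih =>
      intro acc
      rw [List.foldl_cons]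
      rw [hstep sc]
      simp only [List.map_nil]
      rw [ih]
      simp

-- sorted is unchanged when the keys agree on the list's members
theorem pvInsertBy_congr (b1 b2 : List Int → List Int → Bool) (x : List Int) :
    ∀ ys : List (List Int), (∀ y ∈ ys, b1 x y = b2 x y) →
    PySem.List.insertBy b1 x ys = PySem.List.insertBy b2 x ys := by
  intro ys
  induction ys with
  | nil => intro _; rfl
  | cons y t ih =>
      intro h
      show (if b1 x y then x :: y :: t else y :: PySem.List.insertBy b1 x t) = _
      rw [h y (by simp), ih (fun z hz => h z (by simp [hz]))]
      rfl

theorem pvSortedCongr (xs : List (List Int)) (k1 k2 : List Int → List Int)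
    (h : ∀ x ∈ xs, k1 x = k2 x) :
    PySem.List.sorted xs k1 = PySem.List.sorted xs k2 := by
  rw [PySem.List.sorted_eq_foldl_insertBy, PySem.List.sorted_eq_foldl_insertBy]
  suffices hh : ∀ (l : List (List Int)), (∀ x ∈ l, k1 x = k2 x) →
      ∀ (acc : List (List Int)), (∀ y ∈ acc, k1 y = k2 y) →
      l.foldl (fun acc x => PySem.List.insertBy (fun a b => decide (k1 a < k1 b)) x acc) acc =
      l.foldl (fun acc x => PySem.List.insertBy (fun a b => decide (k2 a < k2 b)) x acc) acc by
    exact hh xs h [] (by simp)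
  intro l
  induction l with
  | nil => intro _ acc _; rfl
  | cons x t ih =>
      intro hl acc hacc
      rw [List.foldl_cons, List.foldl_cons]
      have hx : k1 x = k2 x := hl x (by simp)
      have hins : PySem.List.insertBy (fun a b => decide (k1 a < k1 b)) x acc =
          PySem.List.insertBy (fun a b => decide (k2 a < k2 b)) x acc := by
        apply pvInsertBy_congr
        intro y hy
        rw [hx, hacc y hy]
      rw [hins]
      apply ih (fun z hz => hl z (by simp [hz]))
      intro y hy
      rcases (PySem.List.mem_insertBy _ x y acc).mp (by rw [← hins] at hy ⊢; exact hy) with h1 | h2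
      · rw [h1]; exact hx
      · exact hacc y h2

-- per-dimension key agreement on simplices long enough
theorem pvKey0_eq (x : List Int) (hx : (1 : Int) ≤ (x.length : Int)) : pvKeyA0 x = pvKeyB 0 x := by
  unfold pvKeyA0 pvKeyB
  rw [PySem.List.slice_to x (b := 0 + 1) (by norm_num)]
  have h0 : pvGetD0 x 0 = x.getD 0 0 := PySem.List.pyGetD_ofNat' x 0 0
  match x with
  | a :: l =>
    rw [h0]
    norm_num [List.getD]

theorem pvKey1_eq (x : List Int) (hx : (2 : Int) ≤ (x.length : Int)) : pvKeyA1 x = pvKeyB 1 x := by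
  unfold pvKeyA1 pvKeyB
  rw [PySem.List.slice_to x (b := 1 + 1) (by norm_num)]
  have h0 : pvGetD0 x 0 = x.getD 0 0 := PySem.List.pyGetD_ofNat' x 0 0
  have h1 : pvGetD0 x 1 = x.getD 1 0 := PySem.List.pyGetD_ofNat' x 1 0
  match x with
  | a :: b :: l =>
    rw [h0, h1]
    norm_num [List.getD]
    rw [show Int.toNat 2 = 2 from rfl]
    rfl

theorem pvKey2_eq (x : List Int) (hx : (3 : Int) ≤ (x.length : Int)) : pvKeyA2 x = pvKeyB 2 x := by
  unfold pvKeyA2 pvKeyB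
  rw [PySem.List.slice_to x (b := 2 + 1) (by norm_num)]
  have h0 : pvGetD0 x 0 = x.getD 0 0 := PySem.List.pyGetD_ofNat' x 0 0
  have h1 : pvGetD0 x 1 = x.getD 1 0 := PySem.List.pyGetD_ofNat' x 1 0
  have h2 : pvGetD0 x 2 = x.getD 2 0 := PySem.List.pyGetD_ofNat' x 2 0
  match x with
  | a :: b :: c :: l =>
    rw [h0, h1, h2]
    norm_num [List.getD]
    rw [show Int.toNat 3 = 3 from rfl]
    rfl

theorem pvKey3_eq (x : List Int) (hx : (4 : Int) ≤ (x.length : Int)) : pvKeyA3 x = pvKeyB 3 x := by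
  unfold pvKeyA3 pvKeyB
  rw [PySem.List.slice_to x (b := 3 + 1) (by norm_num)]
  have h0 : pvGetD0 x 0 = x.getD 0 0 := PySem.List.pyGetD_ofNat' x 0 0
  have h1 : pvGetD0 x 1 = x.getD 1 0 := PySem.List.pyGetD_ofNat' x 1 0
  have h2 : pvGetD0 x 2 = x.getD 2 0 := PySem.List.pyGetD_ofNat' x 2 0
  have h3 : pvGetD0 x 3 = x.getD 3 0 := PySem.List.pyGetD_ofNat' x 3 0
  match x with
  | a :: b :: c :: d :: l =>
    rw [h0, h1, h2, h3]
    norm_num [List.getD]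
    rw [show Int.toNat 4 = 4 from rfl]
    rfl

theorem pvAuxStep_sorted (n : Int) (hn : 0 ≤ n ∧ n ≤ 3) (sc : List (List Int))
    (hsc : ∀ s ∈ sc, n + 1 ≤ (s.length : Int)) (a : List (List Int)) :
    pvAuxStep n a sc = PySem.List.sorted sc (pvKeyB n) := by
  obtain ⟨h0, h3⟩ := hn
  unfold pvAuxStep
  interval_cases n
  · norm_num
    exact pvSortedCongr sc pvKeyA0 (pvKeyB 0) (fun x hx => pvKey0_eq x (by simpa using hsc x hx))
  · norm_num
    exact pvSortedCongr sc pvKeyA1 (pvKeyB 1) (fun x hx => pvKey1_eq x (by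
      have := hsc x hx; omega))
  · norm_num
    exact pvSortedCongr sc pvKeyA2 (pvKeyB 2) (fun x hx => pvKey2_eq x (by
      have := hsc x hx; omega))
  · norm_num
    exact pvSortedCongr sc pvKeyA3 (pvKeyB 3) (fun x hx => pvKey3_eq x (by
      have := hsc x hx; omega))

theorem pvGetD_map_const (l : List (List (List Int))) (i : Int) :
    ((PySem.List.pyGet? (l.map (fun _ => ([] : List (List Int)))) i).getD [] : List (List Int)) = [] := by
  cases hg : PySem.List.pyGet? (l.map (fun _ => ([] : List (List Int)))) i with
  | none => rfl
  | some x =>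
      have hx : x ∈ l.map (fun _ => ([] : List (List Int))) :=
        PySem.List.mem_of_pyGet?_eq_some _ hg
      rcases List.mem_map.mp hx with ⟨_, _, rfl⟩
      rfl

theorem pvA_empty (slist : List (List (List Int))) (n : Int)
    (hL : pvBuildAux n slist = slist.map (fun _ => [])) :
    simplicesListToZigzagFiltration slist n = ([], []) := by
  suffices h : ∀ (ss : List (List (List Int))) (k : Int) (st : pvStateA),
      st.total = [] → st.indices = [] → st.prevL = [] →
      ((PySem.List.enumerate ss k).foldl
        (pvStepComplexA (slist.map (fun _ => []))) st).total = [] ∧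
      ((PySem.List.enumerate ss k).foldl
        (pvStepComplexA (slist.map (fun _ => []))) st).indices = [] by
    show ((List.foldl (pvStepComplexA (pvBuildAux n slist)) _ _).total,
          (List.foldl (pvStepComplexA (pvBuildAux n slist)) _ _).indices) = _
    rw [hL]
    obtain ⟨h1, h2⟩ := h slist 0 ⟨[], PySem.Set.ofList [], [], [], []⟩ rfl rfl rfl
    rw [h1, h2]
  intro ss
  induction ss with
  | nil => intro k st h1 h2 _; exact ⟨h1, h2⟩
  | cons sc rest ih =>
      intro k st h1 h2 h3
      have henum : PySem.List.enumerate (sc :: rest) k =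
          (k, sc) :: PySem.List.enumerate rest (k + 1) := rfl
      rw [henum, List.foldl_cons]
      have hstep : pvStepComplexA (slist.map (fun _ => [])) st (k, sc) =
          { st with prevSet := sc, prevL := [] } := by
        simp only [pvStepComplexA]
        rw [pvGetD_map_const slist k]
        simp only [List.foldl_nil]
        rw [h3]
        simp only [List.foldl_nil]
      rw [hstep]
      exact ih (k + 1) _ h1 h2 rfl

-- ===== VERDICT (by name: the statement is the Claim_ definition above) =====
theorem simplicesListToZigzagFiltration_spec : Claim_equal_simplicesListToZigzagFiltration := by
  intro slist n _ hPre
  unfold Spec_simplicesListToZigzagFiltration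
  by_cases hn : 0 ≤ n ∧ n ≤ 3
  · have hmapid : ∀ (l : List (List Int)), l.map (fun s => s) = l := fun l => by simp
    have hLB : slist.map (fun sc => (PySem.List.sorted sc (pvKeyB n)).map (fun s => s)) =
        slist.map (fun sc => PySem.List.sorted sc (pvKeyB n)) :=
      List.map_congr_left (fun sc _ => hmapid _)
    have hL : pvBuildAux n slist = slist.map (fun sc => PySem.List.sorted sc (pvKeyB n)) := by
      rw [pvBuildAux_in n hn]
      apply List.map_congr_left
      intro sc hsc
      rw [pvAuxStep_sorted n hn sc (hPre hn sc hsc) []]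
      exact hmapid _
    set L := slist.map (fun sc => PySem.List.sorted sc (pvKeyB n)) with hLdef
    have hlen : L.length = slist.length := by simp [hLdef]
    have hmem : ∀ j t, t ∈ slist.getD j [] ↔ 0 < List.count t (L.getD j []) := by
      intro j t
      by_cases hj : j < slist.length
      · have hLj : L.getD j [] = PySem.List.sorted (slist.getD j []) (pvKeyB n) := by
          simp [hLdef, List.getD, List.getElem?_map, List.getElem?_eq_getElem hj]
        rw [hLj, List.Perm.count_eq (PySem.List.sorted_perm _ _ _)]
        exact List.count_pos_iff.symm
      · have e1 : slist.getD j [] = ([] : List (List Int)) := by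
          simp [List.getD, List.getElem?_eq_none (by omega : slist.length ≤ j)]
        have e2 : L.getD j [] = ([] : List (List Int)) := by
          simp [List.getD, List.getElem?_eq_none (by omega : L.length ≤ j)]
        rw [e1, e2]; simp
    have hA := pv_main_A L slist n hL hlen hmem
    obtain ⟨hB1, hB2⟩ := pv_main_B L
    have halt : simplicesListToZigzagFiltration_alt slist n =
        ((pvBPhase1 L).total, (pvBPhase1 L).total.map (pvBIndexList (pvBPhase1 L).counts)) := by
      unfold simplicesListToZigzagFiltration_alt
      rw [if_pos hn]
      show ((pvBPhase1 (slist.map (fun sc => (PySem.List.sorted sc (pvKeyB n)).map (fun s => s)))).total,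
            (pvBPhase1 (slist.map (fun sc => (PySem.List.sorted sc (pvKeyB n)).map (fun s => s)))).total.map
              (pvBIndexList (pvBPhase1 (slist.map (fun sc => (PySem.List.sorted sc (pvKeyB n)).map (fun s => s)))).counts)) = _
      rw [hLB]
    rw [hA, halt, hB1]
    refine Prod.ext rfl ?_
    show (pvTot L L.length).map (fun t => pvIdxRec t L 0 0) = _
    exact List.map_congr_left (fun t _ => (hB2 t).symm)
  · rw [pvA_empty slist n (pvBuildAux_out n hn slist)]
    unfold simplicesListToZigzagFiltration_alt
    rw [if_neg hn]
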